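-- pv_equiv track=rewrite | github.com/boilpy/bpyutils | src/upyog/util/string.py | labelize
-- ===== SOURCE A (Python) =====
-- def labelize(string):
--     result   = ""
--     upperize = False
--
--     if string.isupper():
--         string = string.lower()
--
--     for i, char in enumerate(string):
--         if char.isupper() and i > 0:
--             result += " "
--         elif char == "_":
--             result  += " "
--             upperize = True
--             continue
--
--         if upperize:
--             char = char.upper()
--             upperize = False
--
--         result += char
--
--     return result.title()
-- ===== SOURCE B (Python) =====
-- import re
--
-- def labelize(string):
--     if string.isupper():
--         string = string.lower()
--     return re.sub(r'_|(?<!^)(?=[A-Z])', ' ', string).title()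
-- ===== Notes on version B (the rewrite author's own statement) =====
-- stated objective: idiomatic
-- what changed: A's character-by-character accumulator loop with an upperize flag is replaced by a single regex substitution (underscore -> space, space inserted before each non-initial uppercase letter) followed by .title(), which makes the case-fixing flag unnecessary.
import Mathlib
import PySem

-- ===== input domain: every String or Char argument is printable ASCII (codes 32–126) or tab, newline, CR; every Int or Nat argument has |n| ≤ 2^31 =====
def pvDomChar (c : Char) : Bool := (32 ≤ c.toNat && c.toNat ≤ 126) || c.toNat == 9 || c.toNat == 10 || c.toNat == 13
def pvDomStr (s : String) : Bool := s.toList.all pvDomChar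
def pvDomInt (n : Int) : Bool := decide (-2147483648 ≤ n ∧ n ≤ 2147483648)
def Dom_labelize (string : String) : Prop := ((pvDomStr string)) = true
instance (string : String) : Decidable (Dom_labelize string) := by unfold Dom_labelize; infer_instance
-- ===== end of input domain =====

-- B replaces A's character-by-character accumulator loop (with its upperize flag) by a single
-- regex substitution pipeline; objective: idiomatic/simpler. Same return value on the ASCII domain.

-- ===== PORT A =====
-- shared library-call helpers: Python str.isupper() and str.title(), exact on the ASCII domain
-- str.isupper(): some cased char exists and no cased char is lowercase (cased = A-Z/a-z in ASCII)
def pyStrIsupper (cs : List Char) : Bool :=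
  cs.any (fun c => PySem.Chars.isalpha c) && cs.all (fun c => !(PySem.Chars.islower c))

-- str.title(): a cased char preceded by a non-cased char (or the start) is uppercased, every
-- other cased char is lowercased, non-cased chars pass through (cased = alphabetic in ASCII)
def pyTitle : List Char → Bool → List Char
  | [], _ => []
  | c :: rest, prevCased =>
    if PySem.Chars.isalpha c then
      (if prevCased then PySem.Chars.lowerChar c else PySem.Chars.upperChar c) :: pyTitle rest true
    else
      c :: pyTitle rest false

-- the for-loop of A over enumerate(string), state = (result, upperize)
def labelizeLoop : List (Int × Char) → List Char → Bool → List Char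
  | [], result, _ => result
  | (i, char) :: rest, result, upperize =>
    if PySem.Chars.isupper char && decide (0 < i) then
      -- result += " ", then fall through to the upperize step and result += char
      let p := if upperize then (PySem.Chars.upperChar char, false) else (char, upperize)
      labelizeLoop rest ((result ++ [' ']) ++ [p.1]) p.2
    else if char = '_' then
      -- result += " "; upperize = True; continue
      labelizeLoop rest (result ++ [' ']) true
    else
      let p := if upperize then (PySem.Chars.upperChar char, false) else (char, upperize)
      labelizeLoop rest (result ++ [p.1]) p.2

def labelize (string : String) : String :=
  let s := if pyStrIsupper string.toList then PySem.Chars.lower string.toList else string.toList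
  String.ofList (pyTitle (labelizeLoop (PySem.List.enumerate s 0) [] false) false)

-- ===== PORT B =====
-- hand port (exact, ASCII) of re.sub(r'_|(?<!^)(?=[A-Z])', ' ', s): every '_' becomes ' ', and a
-- ' ' is inserted before every A-Z char not at position 0 (the zero-width lookahead keeps the char)
def labelize_alt (string : String) : String :=
  let s := if pyStrIsupper string.toList then PySem.Chars.lower string.toList else string.toList
  let spaced := (PySem.List.enumerate s 0).flatMap (fun ic =>
    if ic.2 = '_' then [' ']
    else if decide (0 < ic.1) && PySem.Chars.isupper ic.2 then [' ', ic.2]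
    else [ic.2])
  String.ofList (pyTitle spaced false)

-- ===== PRECONDITION & SPEC =====
def Spec_labelize (string : String) (out : String) : Prop := out = labelize_alt string
instance (string : String) (out : String) : Decidable (Spec_labelize string out) := by unfold Spec_labelize; infer_instance

-- ===== CLAIM (what is proved, stated in full; the proofs are below) =====
def Claim_equal_labelize : Prop := ∀ (string : String), Dom_labelize string → Spec_labelize string (labelize string)

-- ===== LEMMAS AND PROOFS =====

-- the four case-arithmetic facts, checked by decide on every ASCII code point
theorem charTable : ∀ n < 127, (fun c =>
    PySem.Chars.lowerChar (PySem.Chars.upperChar c) = PySem.Chars.lowerChar c ∧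
    PySem.Chars.lowerChar (PySem.Chars.lowerChar c) = PySem.Chars.lowerChar c ∧
    PySem.Chars.isalpha (PySem.Chars.lowerChar c) = PySem.Chars.isalpha c ∧
    PySem.Chars.upperChar (PySem.Chars.lowerChar c) = PySem.Chars.upperChar c) (Char.ofNat n) := by
  decide

theorem charFacts (c : Char) (h : c.toNat < 127) :
    PySem.Chars.lowerChar (PySem.Chars.upperChar c) = PySem.Chars.lowerChar c ∧
    PySem.Chars.lowerChar (PySem.Chars.lowerChar c) = PySem.Chars.lowerChar c ∧
    PySem.Chars.isalpha (PySem.Chars.lowerChar c) = PySem.Chars.isalpha c ∧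
    PySem.Chars.upperChar (PySem.Chars.lowerChar c) = PySem.Chars.upperChar c := by
  have h2 : Char.ofNat c.toNat = c := Char.ofNat_toNat c
  simpa [h2] using charTable c.toNat h

theorem lowerChar_id_of_not_upper (c : Char) (h : PySem.Chars.isupper c = false) :
    PySem.Chars.lowerChar c = c := by
  simp [PySem.Chars.lowerChar, h]

theorem toNat_lt_of_upper (c : Char) (h : PySem.Chars.isupper c = true) : c.toNat < 127 := by
  simp [PySem.Chars.isupper] at h
  have h2 : c.toNat ≤ ('Z').toNat := UInt32.le_iff_toNat_le.mp (Char.le_def.mp h.2)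
  have h3 : ('Z').toNat = 90 := by decide
  omega

theorem toNat_lt_of_lower (c : Char) (h : PySem.Chars.islower c = true) : c.toNat < 127 := by
  simp [PySem.Chars.islower] at h
  have h2 : c.toNat ≤ ('z').toNat := UInt32.le_iff_toNat_le.mp (Char.le_def.mp h.2)
  have h3 : ('z').toNat = 122 := by decide
  omega

-- L1, unconditional
theorem lowerChar_upperChar (c : Char) :
    PySem.Chars.lowerChar (PySem.Chars.upperChar c) = PySem.Chars.lowerChar c := by
  by_cases h : PySem.Chars.islower c = true
  · exact (charFacts c (toNat_lt_of_lower c h)).1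
  · have h2 : PySem.Chars.islower c = false := by simpa using h
    simp [PySem.Chars.upperChar, h2]

-- L2, unconditional
theorem lowerChar_lowerChar (c : Char) :
    PySem.Chars.lowerChar (PySem.Chars.lowerChar c) = PySem.Chars.lowerChar c := by
  by_cases h : PySem.Chars.isupper c = true
  · exact (charFacts c (toNat_lt_of_upper c h)).2.1
  · simp only [lowerChar_id_of_not_upper c (by simpa using h)]

-- L3, unconditional
theorem isalpha_lowerChar (c : Char) :
    PySem.Chars.isalpha (PySem.Chars.lowerChar c) = PySem.Chars.isalpha c := by
  by_cases h : PySem.Chars.isupper c = true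
  · exact (charFacts c (toNat_lt_of_upper c h)).2.2.1
  · simp only [lowerChar_id_of_not_upper c (by simpa using h)]

-- L4, unconditional
theorem upperChar_lowerChar (c : Char) :
    PySem.Chars.upperChar (PySem.Chars.lowerChar c) = PySem.Chars.upperChar c := by
  by_cases h : PySem.Chars.isupper c = true
  · exact (charFacts c (toNat_lt_of_upper c h)).2.2.2
  · simp only [lowerChar_id_of_not_upper c (by simpa using h)]

-- pyTitle sees only the case-class of each char: lowering the input does not change the output
theorem pyTitle_map_lowerChar (l : List Char) : ∀ b,
    pyTitle (l.map PySem.Chars.lowerChar) b = pyTitle l b := by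
  induction l with
  | nil => intro b; rfl
  | cons c rest ih =>
    intro b
    simp only [List.map_cons, pyTitle, isalpha_lowerChar, lowerChar_lowerChar, upperChar_lowerChar]
    by_cases h : PySem.Chars.isalpha c = true
    · simp [h, ih]
    · have hu : PySem.Chars.isupper c = false := by
        simp [PySem.Chars.isalpha] at h; exact h.1
      simp [h, ih, lowerChar_id_of_not_upper c hu]

-- B's per-character emission (the regex substitution), as in labelize_alt
def emitB (ic : Int × Char) : List Char :=
  if ic.2 = '_' then [' ']
  else if decide (0 < ic.1) && PySem.Chars.isupper ic.2 then [' ', ic.2]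
  else [ic.2]

-- the loop of A produces, up to letter case, exactly B's flatMap of emissions
theorem lowerChar_space : PySem.Chars.lowerChar ' ' = ' ' := by decide

theorem loop_lower (xs : List Char) : ∀ (k : Int) (res : List Char) (u : Bool),
    (labelizeLoop (PySem.List.enumerate xs k) res u).map PySem.Chars.lowerChar
      = res.map PySem.Chars.lowerChar
        ++ (PySem.List.enumerate xs k).flatMap (fun ic => (emitB ic).map PySem.Chars.lowerChar) := by
  induction xs with
  | nil => intro k res u; simp [PySem.List.enumerate_nil, labelizeLoop]
  | cons c rest ih =>
    intro k res u
    rw [PySem.List.enumerate_cons, List.flatMap_cons]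
    by_cases hup : (PySem.Chars.isupper c && decide (0 < k)) = true
    · have hne : ¬ (c = '_') := by
        intro he; subst he; simp [PySem.Chars.isupper] at hup
      have hcond : (decide (0 < k) && PySem.Chars.isupper c) = true := by
        rw [Bool.and_comm]; exact hup
      cases u with
      | false =>
        simp [labelizeLoop, hup, ih, emitB, hne, hcond,
          List.map_append, List.map_cons, List.map_nil, lowerChar_space, List.append_assoc,
          List.cons_append, List.nil_append]
      | true =>
        simp [labelizeLoop, hup, ih, emitB, hne, hcond,
          List.map_append, List.map_cons, List.map_nil, lowerChar_space, lowerChar_upperChar,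
          List.append_assoc, List.cons_append, List.nil_append]
    · by_cases hund : c = '_'
      · subst hund
        simp [labelizeLoop, hup, ih, emitB,
          List.map_append, List.map_cons, List.map_nil, lowerChar_space, List.append_assoc,
          List.cons_append, List.nil_append]
      · have hcond : (decide (0 < k) && PySem.Chars.isupper c) = false := by
          rw [Bool.and_comm]; simpa using hup
        cases u with
        | false =>
          simp [labelizeLoop, hup, hund, ih, emitB, hcond,
            List.map_append, List.map_cons, List.map_nil, List.append_assoc,
            List.cons_append, List.nil_append]
        | true =>
          simp [labelizeLoop, hup, hund, ih, emitB, hcond,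
            List.map_append, List.map_cons, List.map_nil, lowerChar_upperChar,
            List.append_assoc, List.cons_append, List.nil_append]

-- ===== VERDICT (by name: the statement is the Claim_ definition above) =====
theorem labelize_spec : Claim_equal_labelize := by
  intro s _
  show labelize s = labelize_alt s
  have key : forall t : List Char,
      String.ofList (pyTitle (labelizeLoop (PySem.List.enumerate t 0) [] false) false)
        = String.ofList (pyTitle ((PySem.List.enumerate t 0).flatMap emitB) false) := by
    intro t
    rw [← pyTitle_map_lowerChar (labelizeLoop (PySem.List.enumerate t 0) [] false) false,
        ← pyTitle_map_lowerChar ((PySem.List.enumerate t 0).flatMap emitB) false,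
        loop_lower t 0 [] false]
    congr 1
    simp [List.map_flatMap]
  exact key (if pyStrIsupper s.toList then PySem.Chars.lower s.toList else s.toList)
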